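-- pv_equiv track=rewrite | github.com/nateshv54/DSA | Strings/Basic string problems/Compressed String.py | charcompressed
-- ===== SOURCE A (Python) =====
-- def charcompressed(s, t):
--     n = 0
--     flag = 1  # Fix: Correct the assignment operator
--     j = 0
--     for i in range(0, len(t)):  # Fix: Loop over the shorter string 't'
--         if t[i] >= '0' and t[i] <= '9':
--             n *= 10
--             if n > 100000:
--                 return 0
--             n += int(t[i]) - int('0')  # Fix: Convert characters to integers
--             j -= 1
--         else:
--             j += n
--             if j >= len(s) or t[i] != s[j]:
--                 flag = 0
--                 break
--             n = 0
--
--         j += 1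
--     j += n
--     if j != len(s):
--         flag = 0
--     if flag:
--         return 1
--     else:
--         return 0
-- ===== SOURCE B (Python) =====
-- def charcompressed(s, t):
--     # Pass 1: tokenize t into (count, letter) run-groups plus a trailing count,
--     # failing with 0 on the per-group overflow guard.
--     groups = []
--     n = 0
--     for ch in t:
--         if '0' <= ch <= '9':
--             n10 = n * 10
--             if n10 > 100000:
--                 return 0
--             n = n10 + (ord(ch) - 48)
--         else:
--             groups.append((n, ch))
--             n = 0
--     # Pass 2: walk s by positions.
--     p = 0
--     for cnt, ch in groups:
--         p += cnt
--         if p >= len(s) or s[p] != ch: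
--             return 0
--         p += 1
--     p += n
--     return 1 if p == len(s) else 0
-- ===== Notes on version B (the rewrite author's own statement) =====
-- stated objective: alternative
-- what changed: Replaced A's single-pass counter/flag/index state machine over t by a two-phase decomposition: first tokenize t into (count, letter) run-groups plus a trailing count (with the overflow guard), then a separate positional scan over s checking each group's boundary character.
import Mathlib
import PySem

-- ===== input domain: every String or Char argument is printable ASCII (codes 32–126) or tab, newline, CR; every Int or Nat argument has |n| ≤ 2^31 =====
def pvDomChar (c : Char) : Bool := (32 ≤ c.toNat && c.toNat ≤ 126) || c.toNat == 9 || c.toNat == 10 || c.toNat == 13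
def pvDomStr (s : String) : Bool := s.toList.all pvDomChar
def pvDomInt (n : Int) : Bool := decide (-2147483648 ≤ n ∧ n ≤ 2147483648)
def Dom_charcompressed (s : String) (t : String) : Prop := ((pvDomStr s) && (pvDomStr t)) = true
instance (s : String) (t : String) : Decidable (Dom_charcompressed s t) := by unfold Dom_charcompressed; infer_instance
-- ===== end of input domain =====

-- B replaces A's single-pass counter/flag state machine by a tokenize-then-scan
-- decomposition (run-groups of t first, then one positional walk over s); same cost, simpler.

-- ===== PORT A =====
-- A's loop over t with state (n, j); `none` = the loop ended by an early `return 0`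
-- or by `break` (flag = 0, so the final answer is 0 either way).
-- `int(t[i]) - int('0')` is ported as the digit value (the branch guarantees '0' ≤ c ≤ '9').
def pvGoA (s : List Char) : List Char → Int → Int → Option (Int × Int)
  | [], n, j => some (n, j)
  | c :: ts, n, j =>
    if '0' ≤ c ∧ c ≤ '9' then
      if n * 10 > 100000 then none
      else pvGoA s ts (n * 10 + ((c.toNat : Int) - ('0'.toNat : Int))) ((j - 1) + 1)
    else
      if j + n ≥ (s.length : Int) ∨ PySem.List.pyGet? s (j + n) ≠ some c then none
      else pvGoA s ts 0 ((j + n) + 1)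

def charcompressed (s : String) (t : String) : Int :=
  match pvGoA s.toList t.toList 0 0 with
  | none => 0
  | some (n, j) => if j + n = (s.toList.length : Int) then 1 else 0

-- ===== PORT B =====
-- Pass 1: run-groups (count, letter) of t plus the trailing count; `none` = overflow guard fired.
def pvTokB : List Char → Int → Option (List (Int × Char) × Int)
  | [], n => some ([], n)
  | c :: ts, n =>
    if '0' ≤ c ∧ c ≤ '9' then
      if n * 10 > 100000 then none
      else pvTokB ts (n * 10 + ((c.toNat : Int) - ('0'.toNat : Int)))
    else (pvTokB ts 0).map (fun g => ((n, c) :: g.1, g.2))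

-- Pass 2: positional walk over s; `none` = a group failed the boundary check.
def pvScanB (s : List Char) : List (Int × Char) → Int → Option Int
  | [], p => some p
  | (cnt, ch) :: gs, p =>
    if p + cnt ≥ (s.length : Int) ∨ PySem.List.pyGet? s (p + cnt) ≠ some ch then none
    else pvScanB s gs ((p + cnt) + 1)

def charcompressed_alt (s : String) (t : String) : Int :=
  match pvTokB t.toList 0 with
  | none => 0
  | some (gs, tr) =>
    match pvScanB s.toList gs 0 with
    | none => 0
    | some p => if p + tr = (s.toList.length : Int) then 1 else 0

-- ===== PRECONDITION & SPEC =====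
def Spec_charcompressed (s : String) (t : String) (out : Int) : Prop := out = charcompressed_alt s t
instance (s : String) (t : String) (out : Int) : Decidable (Spec_charcompressed s t out) := by unfold Spec_charcompressed; infer_instance

-- ===== CLAIM (what is proved, stated in full; the proofs are below) =====
def Claim_equal_charcompressed : Prop := ∀ (s : String) (t : String), Dom_charcompressed s t → Spec_charcompressed s t (charcompressed s t)

-- ===== LEMMAS AND PROOFS =====

lemma pv_key (s : List Char) (ts : List Char) : ∀ (n j : Int),
    (match pvGoA s ts n j with
     | none => (0 : Int)
     | some (n', j') => if j' + n' = (s.length : Int) then 1 else 0)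
    = (match pvTokB ts n with
       | none => (0 : Int)
       | some (gs, tr) =>
         match pvScanB s gs j with
         | none => 0
         | some p => if p + tr = (s.length : Int) then 1 else 0) := by
  induction ts with
  | nil => intro n j; simp [pvGoA, pvTokB, pvScanB]
  | cons c ts ih =>
    intro n j
    by_cases hd : '0' ≤ c ∧ c ≤ '9'
    · by_cases hov : n * 10 > 100000
      · simp [pvGoA, pvTokB, hd, hov]
      · have h1 : (j - 1) + 1 = j := by omega
        simp only [pvGoA, pvTokB, if_pos hd, if_neg hov, h1]
        exact ih _ j
    · by_cases hc : j + n ≥ (s.length : Int) ∨ PySem.List.pyGet? s (j + n) ≠ some c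
      · simp only [pvGoA, pvTokB, if_neg hd]
        cases htok : pvTokB ts 0 with
        | none => simp [if_pos hc]
        | some g => simp [pvScanB, if_pos hc]
      · simp only [pvGoA, pvTokB, if_neg hd, if_neg hc]
        cases htok : pvTokB ts 0 with
        | none =>
          have := ih 0 ((j + n) + 1)
          rw [htok] at this
          simpa using this
        | some g =>
          have := ih 0 ((j + n) + 1)
          rw [htok] at this
          simpa [pvScanB, if_neg hc] using this

-- ===== VERDICT (by name: the statement is the Claim_ definition above) =====
theorem charcompressed_spec : Claim_equal_charcompressed := by
  intro s t _
  unfold Spec_charcompressed charcompressed charcompressed_alt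
  exact pv_key s.toList t.toList 0 0
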